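-- pv_equiv track=rewrite | github.com/m-kocurek/logistics-apps | source/find_cycle.py | down_end
-- ===== SOURCE A (Python) =====
-- def down_end(cycle, track, lo, ld, x, y):
--
--     first = [track[0][0], track[0][1], track[0][2]]
--     zmienna = False
--     while y < (ld-1):
--         y = y + 1
--         if cycle[y][x] == first[0] and y == first[1] and x == first[2]:
--             zmienna = True
--             break
--
--     return zmienna
-- ===== SOURCE B (Python) =====
-- def down_end(cycle, track, lo, ld, x, y):
--     t0 = track[0]
--     ty = t0[1]
--     if y < ty <= ld - 1 and x == t0[2]:
--         return cycle[ty][x] == t0[0]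
--     return False
-- ===== Notes on version B (the rewrite author's own statement) =====
-- stated objective: simpler
-- what changed: The downward while-loop scan is replaced by a single direct check at row ty = track[0][1]: the loop's conjunct 'y == first[1]' can only hold there, so B just tests y < ty <= ld-1, x == track[0][2] and cycle[ty][x] == track[0][0].
import Mathlib
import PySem

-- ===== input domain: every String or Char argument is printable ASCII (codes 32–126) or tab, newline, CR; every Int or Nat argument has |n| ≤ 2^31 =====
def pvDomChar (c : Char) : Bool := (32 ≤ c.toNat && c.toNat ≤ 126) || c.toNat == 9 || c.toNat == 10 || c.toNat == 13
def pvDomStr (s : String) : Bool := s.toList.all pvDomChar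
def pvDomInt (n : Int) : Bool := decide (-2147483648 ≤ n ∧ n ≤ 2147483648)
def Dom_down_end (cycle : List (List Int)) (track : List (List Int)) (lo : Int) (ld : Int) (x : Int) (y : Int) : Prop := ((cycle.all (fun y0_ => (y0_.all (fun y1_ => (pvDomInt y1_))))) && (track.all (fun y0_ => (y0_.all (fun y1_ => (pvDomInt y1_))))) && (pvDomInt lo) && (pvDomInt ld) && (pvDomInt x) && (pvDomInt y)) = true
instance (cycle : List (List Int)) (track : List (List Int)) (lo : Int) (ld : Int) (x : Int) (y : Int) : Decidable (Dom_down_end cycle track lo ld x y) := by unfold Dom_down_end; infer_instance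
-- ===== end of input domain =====

-- B replaces A's downward linear scan by a single direct check at row track[0][1],
-- the only row where A's conjunct 'y == first[1]' can hold. Objective: simpler.

-- ===== PORT A =====
-- The while-loop of A, with first = [f0, f1, f2] already read.  Python raises
-- (IndexError) exactly where a pyGet? below is none; the port returns false there
-- and Pre_down_end excludes those inputs.
def pvLoopA (cycle : List (List Int)) (f0 f1 f2 : Int) (x ld : Int) (y : Int) : Bool :=
  if h : y < ld - 1 then
    match PySem.List.pyGet? cycle (y + 1) with
    | none => false
    | some row =>
      match PySem.List.pyGet? row x with
      | none => false
      | some v =>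
        if v = f0 ∧ y + 1 = f1 ∧ x = f2 then true
        else pvLoopA cycle f0 f1 f2 x ld (y + 1)
  else false
termination_by (ld - 1 - y).toNat
decreasing_by omega

def down_end (cycle : List (List Int)) (track : List (List Int)) (lo : Int) (ld : Int) (x : Int) (y : Int) : Bool :=
  match PySem.List.pyGet? track 0 with
  | none => false
  | some t0 =>
    match PySem.List.pyGet? t0 0, PySem.List.pyGet? t0 1, PySem.List.pyGet? t0 2 with
    | some f0, some f1, some f2 => pvLoopA cycle f0 f1 f2 x ld y
    | _, _, _ => false

-- ===== PORT B =====
def down_end_alt (cycle : List (List Int)) (track : List (List Int)) (lo : Int) (ld : Int) (x : Int) (y : Int) : Bool :=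
  match PySem.List.pyGet? track 0 with
  | none => false
  | some t0 =>
    match PySem.List.pyGet? t0 1 with
    | none => false
    | some ty =>
      if y < ty ∧ ty ≤ ld - 1 ∧ PySem.List.pyGet? t0 2 = some x then
        match PySem.List.pyGet? cycle ty with
        | none => false
        | some row =>
          match PySem.List.pyGet? row x with
          | none => false
          | some v =>
            match PySem.List.pyGet? t0 0 with
            | none => false
            | some f0 => v == f0
      else false

-- ===== PRECONDITION & SPEC =====
-- helper: cycle[i][x] is indexable (no IndexError)
def pvRowOK (cycle : List (List Int)) (x i : Int) : Bool :=
  ((PySem.List.pyGet? cycle i).bind (fun row => PySem.List.pyGet? row x)).isSome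
-- helper: the loop will hit (and break) at row t0[1]
def pvHit (cycle : List (List Int)) (t0 : List Int) (ld x y : Int) : Bool :=
  decide (y < t0.getD 1 0 ∧ t0.getD 1 0 ≤ ld - 1 ∧ x = t0.getD 2 0) &&
  ((PySem.List.pyGet? cycle (t0.getD 1 0)).bind (fun row => PySem.List.pyGet? row x)
    == some (t0.getD 0 0))
-- helper: the last row index A's loop actually reads
def pvStop (cycle : List (List Int)) (t0 : List Int) (ld x y : Int) : Int :=
  if pvHit cycle t0 ld x y then t0.getD 1 0 else ld - 1
-- helper: number of rows scanned, guarded so it is 0 when the bounds fail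
def pvScanLen (n stop y : Int) : Nat :=
  if -n ≤ y + 1 ∧ stop < n then (stop - y).toNat else 0

-- Pre_down_end holds exactly where Python A returns normally: track[0][0..2] exist and
-- every row index the loop reads before stopping (scan range (y, pvStop]) is indexable.
def Pre_down_end (cycle : List (List Int)) (track : List (List Int)) (lo : Int) (ld : Int) (x : Int) (y : Int) : Prop :=
  track ≠ [] ∧ 3 ≤ (track.headD []).length ∧
  (y < pvStop cycle (track.headD []) ld x y →
    (-(cycle.length : Int) ≤ y + 1 ∧ pvStop cycle (track.headD []) ld x y < (cycle.length : Int))) ∧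
  ∀ k ∈ List.range (pvScanLen (cycle.length : Int) (pvStop cycle (track.headD []) ld x y) y),
    pvRowOK cycle x (y + 1 + (k : Int)) = true
instance (cycle : List (List Int)) (track : List (List Int)) (lo : Int) (ld : Int) (x : Int) (y : Int) : Decidable (Pre_down_end cycle track lo ld x y) := by unfold Pre_down_end; infer_instance

def pvWitness_down_end : List (List Int) × List (List Int) × Int × Int × Int × Int :=
  ([[1, 2], [3, 4]], [[3, 1, 0]], 0, 2, 0, 0)

def Spec_down_end (cycle : List (List Int)) (track : List (List Int)) (lo : Int) (ld : Int) (x : Int) (y : Int) (out : Bool) : Prop := out = down_end_alt cycle track lo ld x y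
instance (cycle : List (List Int)) (track : List (List Int)) (lo : Int) (ld : Int) (x : Int) (y : Int) (out : Bool) : Decidable (Spec_down_end cycle track lo ld x y out) := by unfold Spec_down_end; infer_instance

-- ===== CLAIM (what is proved, stated in full; the proofs are below) =====
def Claim_equal_down_end : Prop := ∀ (cycle : List (List Int)) (track : List (List Int)) (lo : Int) (ld : Int) (x : Int) (y : Int), Dom_down_end cycle track lo ld x y → Pre_down_end cycle track lo ld x y → Spec_down_end cycle track lo ld x y (down_end cycle track lo ld x y)

-- ===== LEMMAS AND PROOFS =====

lemma pvHit_iff (cycle : List (List Int)) (t0 : List Int) (ld x y : Int) :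
    pvHit cycle t0 ld x y = true ↔
      (y < t0.getD 1 0 ∧ t0.getD 1 0 ≤ ld - 1 ∧ x = t0.getD 2 0 ∧
       (PySem.List.pyGet? cycle (t0.getD 1 0)).bind (fun row => PySem.List.pyGet? row x)
         = some (t0.getD 0 0)) := by
  simp [pvHit, and_assoc]

-- A's loop equals pvHit, given that every row in the scan range (y, pvStop] is indexable.
lemma pvLoopA_eq_hit (cycle : List (List Int)) (t0 : List Int) (ld x : Int) :
    ∀ y, (∀ i : Int, y < i → i ≤ pvStop cycle t0 ld x y → pvRowOK cycle x i = true) →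
      pvLoopA cycle (t0.getD 0 0) (t0.getD 1 0) (t0.getD 2 0) x ld y
        = pvHit cycle t0 ld x y := by
  suffices H : ∀ n : Nat, ∀ y : Int, (ld - 1 - y).toNat = n →
      (∀ i : Int, y < i → i ≤ pvStop cycle t0 ld x y → pvRowOK cycle x i = true) →
      pvLoopA cycle (t0.getD 0 0) (t0.getD 1 0) (t0.getD 2 0) x ld y
        = pvHit cycle t0 ld x y by
    intro y hv; exact H _ y rfl hv
  intro n
  induction n with
  | zero =>
    intro y hn _
    have hy : ¬ y < ld - 1 := by omega
    rw [pvLoopA, dif_neg hy]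
    by_cases hh : pvHit cycle t0 ld x y = true
    · exfalso
      obtain ⟨h1, h2, _, _⟩ := (pvHit_iff cycle t0 ld x y).mp hh
      omega
    · simp [hh]
  | succ n ih =>
    intro y hn hv
    have hy : y < ld - 1 := by omega
    -- the scanned index y+1 is within the validity range
    have hstop : y + 1 ≤ pvStop cycle t0 ld x y := by
      by_cases hh : pvHit cycle t0 ld x y = true
      · obtain ⟨h1, _, _, _⟩ := (pvHit_iff cycle t0 ld x y).mp hh
        simp only [pvStop, if_pos hh]; omega
      · simp only [pvStop, if_neg hh]; omega
    have hrow := hv (y + 1) (by omega) hstop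
    unfold pvRowOK at hrow
    obtain ⟨v, hv2⟩ := Option.isSome_iff_exists.mp hrow
    cases hcy : PySem.List.pyGet? cycle (y + 1) with
    | none => rw [hcy] at hv2; simp at hv2
    | some row =>
      rw [hcy] at hv2; simp only [Option.bind_some] at hv2
      rw [pvLoopA, dif_pos hy, hcy]
      simp only [hv2]
      by_cases hb : v = t0.getD 0 0 ∧ y + 1 = t0.getD 1 0 ∧ x = t0.getD 2 0
      · rw [if_pos hb]
        obtain ⟨hb0, hb1, hb2⟩ := hb
        symm
        rw [pvHit_iff]
        refine ⟨by omega, by omega, hb2, ?_⟩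
        rw [← hb1, hcy, Option.bind_some, hv2, hb0]
      · rw [if_neg hb]
        -- pvHit is stable from y to y+1 in the non-matching case
        have hsame : pvHit cycle t0 ld x (y + 1) = pvHit cycle t0 ld x y := by
          by_cases hh : pvHit cycle t0 ld x y = true
          · obtain ⟨h1, h2, h3, h4⟩ := (pvHit_iff cycle t0 ld x y).mp hh
            have hne : y + 1 ≠ t0.getD 1 0 := by
              intro he
              rw [← he, hcy, Option.bind_some, hv2] at h4
              exact hb ⟨Option.some.inj h4, he, h3⟩
            rw [hh]
            rw [pvHit_iff]
            exact ⟨by omega, h2, h3, h4⟩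
          · have : pvHit cycle t0 ld x (y + 1) ≠ true := by
              intro hh'
              obtain ⟨h1, h2, h3, h4⟩ := (pvHit_iff cycle t0 ld x (y + 1)).mp hh'
              exact hh ((pvHit_iff cycle t0 ld x y).mpr ⟨by omega, h2, h3, h4⟩)
            simp only [Bool.not_eq_true] at this hh
            rw [this, hh]
        have hstopsame : pvStop cycle t0 ld x (y + 1) = pvStop cycle t0 ld x y := by
          unfold pvStop; rw [hsame]
        rw [← hsame]
        refine ih (y + 1) (by omega) ?_
        intro i hi1 hi2
        rw [hstopsame] at hi2
        exact hv i (by omega) hi2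

lemma alt_reduce (cycle : List (List Int)) (t0 : List Int) (ld x y : Int) :
    (if y < t0.getD 1 0 ∧ t0.getD 1 0 ≤ ld - 1 ∧ (some (t0.getD 2 0) : Option Int) = some x then
      match PySem.List.pyGet? cycle (t0.getD 1 0) with
      | none => false
      | some row =>
        match PySem.List.pyGet? row x with
        | none => false
        | some v =>
          match (some (t0.getD 0 0) : Option Int) with
          | none => false
          | some f0 => v == f0
    else false) = pvHit cycle t0 ld x y := by
  by_cases hcnd : y < t0.getD 1 0 ∧ t0.getD 1 0 ≤ ld - 1 ∧ (some (t0.getD 2 0) : Option Int) = some x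
  · rw [if_pos hcnd]
    obtain ⟨c1, c2, c3⟩ := hcnd
    have c3' : x = t0.getD 2 0 := (Option.some.inj c3).symm
    cases hcy : PySem.List.pyGet? cycle (t0.getD 1 0) with
    | none =>
      dsimp only
      symm; rw [Bool.eq_false_iff]; intro hh
      obtain ⟨_, _, _, h4⟩ := (pvHit_iff cycle t0 ld x y).mp hh
      rw [hcy] at h4; simp at h4
    | some row =>
      dsimp only
      cases hrx : PySem.List.pyGet? row x with
      | none =>
        symm; rw [Bool.eq_false_iff]; intro hh
        obtain ⟨_, _, _, h4⟩ := (pvHit_iff cycle t0 ld x y).mp hh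
        rw [hcy, Option.bind_some, hrx] at h4; simp at h4
      | some v =>
        dsimp only
        by_cases hv0 : v = t0.getD 0 0
        · have h1 : pvHit cycle t0 ld x y = true :=
            (pvHit_iff cycle t0 ld x y).mpr ⟨c1, c2, c3', by rw [hcy, Option.bind_some, hrx, hv0]⟩
          rw [h1]
          exact beq_iff_eq.mpr hv0
        · have h1 : pvHit cycle t0 ld x y = false := by
            rw [Bool.eq_false_iff]; intro hh
            obtain ⟨_, _, _, h4⟩ := (pvHit_iff cycle t0 ld x y).mp hh
            rw [hcy, Option.bind_some, hrx] at h4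
            exact hv0 (Option.some.inj h4)
          rw [h1]
          exact beq_eq_false_iff_ne.mpr hv0
  · rw [if_neg hcnd]
    symm
    rw [Bool.eq_false_iff]
    intro hh
    obtain ⟨h1, h2, h3, _⟩ := (pvHit_iff cycle t0 ld x y).mp hh
    exact hcnd ⟨h1, h2, by rw [h3]⟩

-- ===== VERDICT (by name: the statement is the Claim_ definition above) =====
theorem down_end_spec : Claim_equal_down_end := by
  intro cycle track lo ld x y _hDom hPre
  obtain ⟨hne, h3, hbnd, hall⟩ := hPre
  unfold Spec_down_end
  cases track with
  | nil => exact absurd rfl hne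
  | cons t0 rest =>
    simp only [List.headD_cons] at h3 hbnd hall
    obtain ⟨a, b, c, t', rfl⟩ : ∃ a b c t', t0 = a :: b :: c :: t' := by
      cases t0 with
      | nil => simp at h3
      | cons a t1 =>
        cases t1 with
        | nil => simp at h3
        | cons b t2 =>
          cases t2 with
          | nil => simp at h3
          | cons c t' => exact ⟨a, b, c, t', rfl⟩
    have hc0 : PySem.List.pyGet? ((a :: b :: c :: t') :: rest) (0 : Int) = some (a :: b :: c :: t') :=
      PySem.List.pyGet?_zero_cons _ rest
    have hg0 : PySem.List.pyGet? (a :: b :: c :: t') (0 : Int) = some ((a :: b :: c :: t').getD 0 0) := by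
      simp [PySem.List.pyGet?, PySem.List.pyIdx?]; rw [if_pos (by omega)]; simp
    have hg1 : PySem.List.pyGet? (a :: b :: c :: t') (1 : Int) = some ((a :: b :: c :: t').getD 1 0) := by
      simp [PySem.List.pyGet?, PySem.List.pyIdx?]; rw [if_pos (by omega)]; simp
    have hg2 : PySem.List.pyGet? (a :: b :: c :: t') (2 : Int) = some ((a :: b :: c :: t').getD 2 0) := by
      simp [PySem.List.pyGet?, PySem.List.pyIdx?]; rw [if_pos (by omega)]; simp
    have hv' : ∀ i : Int, y < i → i ≤ pvStop cycle (a :: b :: c :: t') ld x y → pvRowOK cycle x i = true := by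
      intro i hi1 hi2
      have hb := hbnd (by omega)
      have hk : i = y + 1 + (((i - y - 1).toNat : Nat) : Int) := by omega
      have hmem : (i - y - 1).toNat ∈ List.range (pvScanLen (cycle.length : Int) (pvStop cycle (a :: b :: c :: t') ld x y) y) := by
        rw [List.mem_range, pvScanLen, if_pos ⟨hb.1, hb.2⟩]
        omega
      rw [hk]
      exact hall _ hmem
    unfold down_end down_end_alt
    simp only [hc0, hg0, hg1, hg2]
    rw [pvLoopA_eq_hit cycle (a :: b :: c :: t') ld x y hv', ← alt_reduce]
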